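-- pv_equiv track=rewrite | github.com/lucashuati/cefet-crawler | python-individual/funcs.py | indice_prim_valor_igual
-- ===== SOURCE A (Python) =====
-- def indice_prim_valor_igual(lista1, lista2):
--     indice = 0
--     for l1 in lista1:
--         for l2 in lista2:
--             if l1 == l2:
--                 return indice
--         indice += 1
--     return None
-- ===== SOURCE B (Python) =====
-- def indice_prim_valor_igual(lista1, lista2):
--     pos = {}
--     for i, v in enumerate(lista1):
--         if v not in pos:
--             pos[v] = i
--     best = None
--     for x in lista2:
--         j = pos.get(x)
--         if j is not None and (best is None or j < best):
--             best = j
--     return best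
-- ===== Notes on version B (the rewrite author's own statement) =====
-- stated objective: alternative
-- what changed: Replaces A's nested scan (for each lista1 element, an inner scan of lista2) with a dict mapping each lista1 value to its first index (built in one pass, no overwrite on duplicates) followed by a single pass over lista2 keeping the minimum looked-up index.
import Mathlib
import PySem

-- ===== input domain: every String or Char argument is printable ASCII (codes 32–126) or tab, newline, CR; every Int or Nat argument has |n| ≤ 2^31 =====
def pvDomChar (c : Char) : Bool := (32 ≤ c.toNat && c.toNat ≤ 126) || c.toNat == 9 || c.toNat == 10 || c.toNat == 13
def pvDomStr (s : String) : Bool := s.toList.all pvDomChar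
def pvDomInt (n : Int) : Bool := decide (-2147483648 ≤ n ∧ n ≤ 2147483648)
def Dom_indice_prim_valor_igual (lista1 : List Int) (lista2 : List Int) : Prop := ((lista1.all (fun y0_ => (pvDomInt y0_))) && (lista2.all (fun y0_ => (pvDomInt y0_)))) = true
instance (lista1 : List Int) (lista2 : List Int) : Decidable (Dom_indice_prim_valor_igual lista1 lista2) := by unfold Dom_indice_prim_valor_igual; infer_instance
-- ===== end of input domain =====

-- B replaces A's nested scans by a first-index dict over lista1 and a single
-- min-pass over lista2 (objective: alternative decomposition).

-- ===== PORT A =====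
-- inner loop: 'for l2 in lista2: if l1 == l2: return indice'
def pvInnerA (l1 : Int) : List Int → Bool
  | [] => false
  | l2 :: rest => if l1 == l2 then true else pvInnerA l1 rest

-- outer loop: 'for l1 in lista1: …; indice += 1'
def pvLoopA (lista2 : List Int) : List Int → Int → Option Int
  | [], _ => none
  | l1 :: rest, indice =>
      if pvInnerA l1 lista2 then some indice else pvLoopA lista2 rest (indice + 1)

def indice_prim_valor_igual (lista1 : List Int) (lista2 : List Int) : Option Int :=
  pvLoopA lista2 lista1 0

-- ===== PORT B =====
-- 'for i, v in enumerate(lista1): if v not in pos: pos[v] = i'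
def pvBuildPos : List Int → Int → PySem.Dict Int Int → PySem.Dict Int Int
  | [], _, pos => pos
  | v :: rest, i, pos =>
      pvBuildPos rest (i + 1) (if pos.contains v then pos else pos.insert v i)

-- 'for x in lista2: j = pos.get(x); if j is not None and (best is None or j < best): best = j'
def pvMinLoop (pos : PySem.Dict Int Int) : List Int → Option Int → Option Int
  | [], best => best
  | x :: rest, best =>
      pvMinLoop pos rest
        (match pos.get? x, best with
         | some j, none => some j
         | some j, some b => if j < b then some j else some b
         | none, _ => best)

def indice_prim_valor_igual_alt (lista1 : List Int) (lista2 : List Int) : Option Int :=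
  pvMinLoop (pvBuildPos lista1 0 PySem.Dict.empty) lista2 none

-- ===== PRECONDITION & SPEC =====
def Spec_indice_prim_valor_igual (lista1 : List Int) (lista2 : List Int) (out : Option Int) : Prop := out = indice_prim_valor_igual_alt lista1 lista2
instance (lista1 : List Int) (lista2 : List Int) (out : Option Int) : Decidable (Spec_indice_prim_valor_igual lista1 lista2 out) := by unfold Spec_indice_prim_valor_igual; infer_instance

-- ===== CLAIM (what is proved, stated in full; the proofs are below) =====
def Claim_equal_indice_prim_valor_igual : Prop := ∀ (lista1 : List Int) (lista2 : List Int), Dom_indice_prim_valor_igual lista1 lista2 → Spec_indice_prim_valor_igual lista1 lista2 (indice_prim_valor_igual lista1 lista2)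

-- ===== LEMMAS AND PROOFS =====

-- first-occurrence index of v in l (proof helper)
def pvIdxOf : List Int → Int → Option Nat
  | [], _ => none
  | x :: rest, v => if x = v then some 0 else (pvIdxOf rest v).map (· + 1)

-- characterisation both results satisfy
def Good (lista1 lista2 : List Int) : Option Int → Prop
  | none => ∀ v ∈ lista1, v ∉ lista2
  | some j => ∃ k : Nat, j = (k : Int) ∧
      (∃ v, lista1[k]? = some v ∧ v ∈ lista2) ∧
      (∀ k' < k, ∀ v', lista1[k']? = some v' → v' ∉ lista2)

theorem pvInnerA_iff (v : Int) (l : List Int) : pvInnerA v l = true ↔ v ∈ l := by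
  induction l with
  | nil => simp [pvInnerA]
  | cons x rest ih =>
    simp only [pvInnerA, List.mem_cons]
    by_cases h : v = x <;> simp [h, ih]

theorem good_unique (lista1 lista2 : List Int) (r r' : Option Int)
    (h : Good lista1 lista2 r) (h' : Good lista1 lista2 r') : r = r' := by
  match r, r' with
  | none, none => rfl
  | none, some j' =>
    obtain ⟨k, _, ⟨v, hv, hv2⟩, _⟩ := h'
    exact absurd hv2 (h v (List.mem_of_getElem? hv))
  | some j, none =>
    obtain ⟨k, _, ⟨v, hv, hv2⟩, _⟩ := h
    exact absurd hv2 (h' v (List.mem_of_getElem? hv))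
  | some j, some j' =>
    obtain ⟨k, hk, ⟨v, hv, hv2⟩, hmin⟩ := h
    obtain ⟨k', hk', ⟨v', hv', hv2'⟩, hmin'⟩ := h'
    rcases Nat.lt_trichotomy k k' with hlt | heq | hgt
    · exact absurd hv2 (hmin' k hlt v hv)
    · subst heq; rw [hk, hk']
    · exact absurd hv2' (hmin k' hgt v' hv')

theorem pvLoopA_shift (lista2 : List Int) (l : List Int) (i : Int) :
    pvLoopA lista2 l i = (pvLoopA lista2 l 0).map (fun j => j + i) := by
  induction l generalizing i with
  | nil => simp [pvLoopA]
  | cons v rest ih =>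
    simp only [pvLoopA]
    by_cases h : pvInnerA v lista2 <;> simp [h]
    rw [ih (i + 1), ih 1]
    cases pvLoopA lista2 rest 0 <;> simp <;> ring

theorem A_good (lista1 lista2 : List Int) :
    Good lista1 lista2 (pvLoopA lista2 lista1 0) := by
  induction lista1 with
  | nil => intro v hv; simp at hv
  | cons v rest ih =>
    simp only [pvLoopA]
    by_cases h : pvInnerA v lista2
    · simp only [h, if_true]
      refine ⟨0, rfl, ⟨v, by simp, (pvInnerA_iff v lista2).mp h⟩, ?_⟩
      intro k' hk'; omega
    · simp only [h, if_false, Bool.false_eq_true]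
      rw [pvLoopA_shift]
      have hvnot : v ∉ lista2 := fun hm => h ((pvInnerA_iff v lista2).mpr hm)
      cases hr : pvLoopA lista2 rest 0 with
      | none =>
        rw [hr] at ih
        simp only [Option.map_none]
        intro w hw
        rcases List.mem_cons.mp hw with rfl | hw'
        · exact hvnot
        · exact ih w hw'
      | some j =>
        rw [hr] at ih
        obtain ⟨k, hk, ⟨w, hw, hw2⟩, hmin⟩ := ih
        simp only [Option.map_some]
        refine ⟨k + 1, by push_cast [hk]; ring, ⟨w, by simpa using hw, hw2⟩, ?_⟩
        intro k' hk' v' hv'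
        match k' with
        | 0 => simp at hv'; subst hv'; exact hvnot
        | k'' + 1 =>
          simp only [List.getElem?_cons_succ] at hv'
          exact hmin k'' (by omega) v' hv'

theorem pvIdxOf_none_iff (l : List Int) (v : Int) : pvIdxOf l v = none ↔ v ∉ l := by
  induction l with
  | nil => simp [pvIdxOf]
  | cons x rest ih =>
    simp only [pvIdxOf, List.mem_cons]
    by_cases h : x = v
    · simp [h]
    · cases hr : pvIdxOf rest v <;> simp [h, hr, eq_comm] at ih ⊢ <;> tauto

theorem pvIdxOf_some (l : List Int) (v : Int) (k : Nat) (h : pvIdxOf l v = some k) :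
    l[k]? = some v ∧ ∀ k' < k, l[k']? ≠ some v := by
  induction l generalizing k with
  | nil => simp [pvIdxOf] at h
  | cons x rest ih =>
    simp only [pvIdxOf] at h
    by_cases hx : x = v
    · simp only [hx, if_true] at h
      cases h
      exact ⟨by simp [hx], fun k' hk' => by omega⟩
    · simp only [hx, if_false] at h
      cases hr : pvIdxOf rest v with
      | none => rw [hr] at h; simp at h
      | some k0 =>
        rw [hr] at h; simp at h
        obtain ⟨h1, h2⟩ := ih k0 hr
        subst h
        refine ⟨by simpa using h1, ?_⟩
        intro k' hk'
        match k' with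
        | 0 => simpa [eq_comm] using hx
        | k'' + 1 => simpa using h2 k'' (by omega)

theorem pvIdxOf_le_of_at (l : List Int) (v : Int) (k' : Nat) (h : l[k']? = some v) :
    ∃ k ≤ k', pvIdxOf l v = some k := by
  induction l generalizing k' with
  | nil => simp at h
  | cons x rest ih =>
    by_cases hx : x = v
    · exact ⟨0, Nat.zero_le _, by simp [pvIdxOf, hx]⟩
    · match k' with
      | 0 => simp at h; exact absurd h hx
      | k'' + 1 =>
        simp only [List.getElem?_cons_succ] at h
        obtain ⟨k, hk, hidx⟩ := ih k'' h
        exact ⟨k + 1, by omega, by simp [pvIdxOf, hx, hidx]⟩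

theorem buildPos_get? (l : List Int) (i : Int) (pos : PySem.Dict Int Int) (v : Int) :
    (pvBuildPos l i pos).get? v =
      ((pos.get? v).orElse (fun _ => (pvIdxOf l v).map (fun k => i + (k : Int)))) := by
  induction l generalizing i pos with
  | nil => cases hpv : pos.get? v <;> simp [pvBuildPos, pvIdxOf, Option.orElse, hpv]
  | cons x rest ih =>
    simp only [pvBuildPos, pvIdxOf]
    rw [ih]
    rw [PySem.Dict.contains_eq_isSome_get?]
    by_cases hx : x = v
    · subst hx
      cases hpx : pos.get? x with
      | some w => simp [hpx, Option.orElse]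
      | none =>
        simp only [hpx, Option.isSome_none, Bool.false_eq_true, if_false]
        rw [PySem.Dict.get?_insert_self]
        simp [Option.orElse]
    · have hget : (if (pos.get? x).isSome = true then pos else pos.insert x i).get? v = pos.get? v := by
        split
        · rfl
        · exact PySem.Dict.get?_insert_of_ne pos i (fun h => hx h.symm)
      rw [hget]
      cases hpv : pos.get? v with
      | some w => simp [Option.orElse]
      | none =>
        simp only [Option.orElse, hx, if_false]
        cases pvIdxOf rest v <;> simp <;> push_cast <;> ring

theorem minLoop_spec (pos : PySem.Dict Int Int) (l : List Int) :
    ∀ best : Option Int,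
      (pvMinLoop pos l best = none → best = none ∧ ∀ x ∈ l, pos.get? x = none) ∧
      (∀ m, pvMinLoop pos l best = some m →
        (best = some m ∨ ∃ x ∈ l, pos.get? x = some m) ∧
        (∀ b, best = some b → m ≤ b) ∧
        (∀ x ∈ l, ∀ y, pos.get? x = some y → m ≤ y)) := by
  induction l with
  | nil =>
    intro best
    simp only [pvMinLoop]
    exact ⟨fun h => ⟨h, by simp⟩,
      fun m h => ⟨Or.inl h, fun b hb => by rw [h] at hb; injection hb with h'; omega, by simp⟩⟩
  | cons x rest ih =>
    intro best
    cases hpx : pos.get? x with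
    | none =>
      have hstep : pvMinLoop pos (x :: rest) best = pvMinLoop pos rest best := by
        simp only [pvMinLoop]; rw [hpx]
      rw [hstep]
      refine ⟨fun h => ?_, fun m h => ?_⟩
      · obtain ⟨hb, hall⟩ := (ih best).1 h
        refine ⟨hb, fun y hy => ?_⟩
        rcases List.mem_cons.mp hy with rfl | hy'
        · exact hpx
        · exact hall y hy'
      · obtain ⟨hsrc, hle, hall⟩ := (ih best).2 m h
        refine ⟨?_, hle, ?_⟩
        · rcases hsrc with hs | ⟨y, hy, hgy⟩
          · exact Or.inl hs
          · exact Or.inr ⟨y, List.mem_cons_of_mem _ hy, hgy⟩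
        · intro y hy z hz
          rcases List.mem_cons.mp hy with rfl | hy'
          · rw [hpx] at hz; cases hz
          · exact hall y hy' z hz
    | some j =>
      obtain ⟨m0, hstep, hm0j, hm0le, hm0src⟩ :
          ∃ m0, pvMinLoop pos (x :: rest) best = pvMinLoop pos rest (some m0) ∧ m0 ≤ j ∧
            (∀ b, best = some b → m0 ≤ b) ∧ (m0 = j ∨ best = some m0) := by
        cases best with
        | none => exact ⟨j, by simp only [pvMinLoop, hpx], le_refl j, by simp, Or.inl rfl⟩
        | some b =>
          by_cases hc : j < b
          · exact ⟨j, by simp only [pvMinLoop, hpx]; simp [hc], le_refl j,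
              fun b' hb' => by injection hb' with h'; omega, Or.inl rfl⟩
          · exact ⟨b, by simp only [pvMinLoop, hpx]; simp [hc], by omega,
              fun b' hb' => by injection hb' with h'; omega, Or.inr rfl⟩
      rw [hstep]
      refine ⟨fun h => ?_, fun m h => ?_⟩
      · obtain ⟨hb, _⟩ := (ih (some m0)).1 h
        cases hb
      · obtain ⟨hsrc, hle, hall⟩ := (ih (some m0)).2 m h
        have hmm0 : m ≤ m0 := hle m0 rfl
        refine ⟨?_, ?_, ?_⟩
        · rcases hsrc with hs | ⟨y, hy, hgy⟩
          · injection hs with h'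
            subst h'
            rcases hm0src with h1 | h2
            · exact Or.inr ⟨x, List.mem_cons_self, by rw [hpx, h1]⟩
            · exact Or.inl h2
          · exact Or.inr ⟨y, List.mem_cons_of_mem _ hy, hgy⟩
        · intro b hb
          have := hm0le b hb; omega
        · intro y hy z hz
          rcases List.mem_cons.mp hy with rfl | hy'
          · rw [hpx] at hz; injection hz with h'; omega
          · exact hall y hy' z hz

theorem B_good (lista1 lista2 : List Int) :
    Good lista1 lista2 (indice_prim_valor_igual_alt lista1 lista2) := by
  unfold indice_prim_valor_igual_alt
  have hpos : ∀ v, (pvBuildPos lista1 0 PySem.Dict.empty).get? v =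
      (pvIdxOf lista1 v).map (fun k => (k : Int)) := by
    intro v
    rw [buildPos_get?]
    rw [PySem.Dict.get?_empty]
    cases pvIdxOf lista1 v <;> simp [Option.orElse]
  cases hr : pvMinLoop (pvBuildPos lista1 0 PySem.Dict.empty) lista2 none with
  | none =>
    obtain ⟨_, hall⟩ := (minLoop_spec _ lista2 none).1 hr
    intro v hv hv2
    have := hall v hv2
    rw [hpos v] at this
    cases hidx : pvIdxOf lista1 v with
    | some k => rw [hidx] at this; simp at this
    | none => exact absurd hv ((pvIdxOf_none_iff lista1 v).mp hidx)
  | some m =>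
    obtain ⟨hsrc, _, hall⟩ := (minLoop_spec _ lista2 none).2 m hr
    rcases hsrc with hs | ⟨x, hx, hgx⟩
    · cases hs
    · rw [hpos x] at hgx
      cases hidx : pvIdxOf lista1 x with
      | none => rw [hidx] at hgx; cases hgx
      | some k =>
        rw [hidx] at hgx
        simp at hgx
        obtain ⟨h1, _⟩ := pvIdxOf_some lista1 x k hidx
        refine ⟨k, hgx.symm, ⟨x, h1, hx⟩, ?_⟩
        intro k' hk' v' hv' hv2'
        obtain ⟨k'', hk'', hidx'⟩ := pvIdxOf_le_of_at lista1 v' k' hv'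
        have hg' : (pvBuildPos lista1 0 PySem.Dict.empty).get? v' = some (k'' : Int) := by
          rw [hpos v', hidx']; rfl
        have := hall v' hv2' _ hg'
        omega

-- ===== VERDICT (by name: the statement is the Claim_ definition above) =====
theorem indice_prim_valor_igual_spec : Claim_equal_indice_prim_valor_igual := by
  intro lista1 lista2 _
  unfold Spec_indice_prim_valor_igual
  exact good_unique lista1 lista2 _ _ (A_good lista1 lista2) (B_good lista1 lista2)
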